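-- pv_equiv track=rewrite | github.com/stemanfredi/company-match | chamber_document_analyzer.py | _extract_sections_by_keywords
-- ===== SOURCE A (Python) =====
-- from typing import Dict, List, Optional, Any
--
-- def _extract_sections_by_keywords(
--     text: str, keywords: List[str], context_lines: int = 3
-- ) -> str:
--     """Extract text sections containing specific keywords with context"""
--     lines = text.split("\n")
--     relevant_sections = []
--
--     for i, line in enumerate(lines):
--         line_lower = line.lower()
--         if any(keyword in line_lower for keyword in keywords):
--             # Include context around relevant lines
--             start = max(0, i - context_lines)
--             end = min(len(lines), i + context_lines + 1)
--             section = lines[start:end]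
--             relevant_sections.extend(section)
--
--     # Remove duplicates while preserving order
--     seen = set()
--     unique_sections = []
--     for line in relevant_sections:
--         if line not in seen:
--             seen.add(line)
--             unique_sections.append(line)
--
--     return "\n".join(unique_sections)
-- ===== SOURCE B (Python) =====
-- from typing import List
--
-- def _extract_sections_by_keywords(
--     text: str, keywords: List[str], context_lines: int = 3
-- ) -> str:
--     """Extract text sections containing specific keywords with context.
--
--     One-pass version: find matching line numbers, merge the (sorted,
--     overlapping) context windows on the fly so every covered line index is
--     visited once and in increasing order, then dedup by line content."""
--     lines = text.split("\n")
--     n = len(lines)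
--     matches = [i for i, line in enumerate(lines)
--                if any(k in line.lower() for k in keywords)]
--     seen = set()
--     out = []
--     hi = 0  # first index not yet covered by an earlier window
--     for i in matches:
--         start = max(0, i - context_lines)
--         end = min(n, i + context_lines + 1)
--         for j in range(max(start, hi), end):
--             if lines[j] not in seen:
--                 seen.add(lines[j])
--                 out.append(lines[j])
--         hi = max(hi, end)
--     return "\n".join(out)
-- ===== Notes on version B (the rewrite author's own statement) =====
-- stated objective: alternative
-- what changed: Instead of appending every matching line's full context slice and deduplicating the concatenation afterwards, B collects the (sorted) matching line numbers and merges their overlapping context windows in a single left-to-right sweep, emitting each covered line index once while deduplicating by content on the fly.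
-- outside the precondition, e.g. on _extract_sections_by_keywords('x y\na\nb\nc', [' '], -2): A returns 'b', B returns ''
import Mathlib
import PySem

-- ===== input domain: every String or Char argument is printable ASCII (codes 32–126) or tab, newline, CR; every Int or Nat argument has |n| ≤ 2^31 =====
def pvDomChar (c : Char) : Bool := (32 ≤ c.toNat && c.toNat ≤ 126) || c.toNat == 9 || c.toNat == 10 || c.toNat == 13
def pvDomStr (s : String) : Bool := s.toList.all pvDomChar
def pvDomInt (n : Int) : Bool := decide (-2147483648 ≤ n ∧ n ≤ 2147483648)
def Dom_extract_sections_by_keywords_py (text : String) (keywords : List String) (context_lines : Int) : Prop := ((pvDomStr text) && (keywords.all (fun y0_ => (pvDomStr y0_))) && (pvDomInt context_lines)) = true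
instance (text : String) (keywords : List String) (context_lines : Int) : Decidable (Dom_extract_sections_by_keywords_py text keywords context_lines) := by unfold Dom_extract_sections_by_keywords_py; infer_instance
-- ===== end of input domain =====

-- B replaces A's "append every context slice, then dedup the concatenation" by a single
-- left-to-right sweep that merges the sorted, possibly overlapping context windows on the fly,
-- emitting each covered line index once (objective: alternative algorithm, same measured cost).

-- ===== PORT A =====
def extract_sections_by_keywords_py (text : String) (keywords : List String) (context_lines : Int) : String :=
  let lines := (PySem.Str.split? text "\n").getD []
  let relevant_sections := (PySem.List.enumerate lines).foldl
    (fun acc p =>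
      let line_lower := PySem.Str.lower p.2
      if keywords.any (fun keyword => PySem.Str.isIn keyword line_lower) then
        let start := max 0 (p.1 - context_lines)
        let end_ := min (PySem.List.len lines) (p.1 + context_lines + 1)
        acc ++ PySem.List.slice lines (some start) (some end_)
      else acc) []
  let st := relevant_sections.foldl
    (fun (st : PySem.Set String × List String) line =>
      if st.1.contains line then st else (st.1.add line, st.2 ++ [line]))
    (PySem.Set.empty, [])
  PySem.Str.join "\n" st.2

-- ===== PORT B =====
def extract_sections_by_keywords_py_alt (text : String) (keywords : List String) (context_lines : Int) : String :=
  let lines := (PySem.Str.split? text "\n").getD []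
  let n := PySem.List.len lines
  let matches_ := ((PySem.List.enumerate lines).filter
      (fun p => keywords.any (fun k => PySem.Str.isIn k (PySem.Str.lower p.2)))).map (fun p => p.1)
  let st := matches_.foldl
    (fun (st : (PySem.Set String × List String) × Int) i =>
      let start := max 0 (i - context_lines)
      let e := min n (i + context_lines + 1)
      let inner := (PySem.List.pyRange (max start st.2) e).foldl
        (fun (d : PySem.Set String × List String) j =>
          let lj := PySem.List.pyGetD lines j ""
          if d.1.contains lj then d else (d.1.add lj, d.2 ++ [lj])) st.1
      (inner, max st.2 e))
    ((PySem.Set.empty, []), 0)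
  PySem.Str.join "\n" st.1.2

-- ===== PRECONDITION & SPEC =====
-- Pre_ excludes negative context_lines (outside the task's natural domain): there A's Python
-- slice end index goes negative and wraps around, emitting accidental lines from the tail of the
-- text, while B naturally emits nothing.
def Pre_extract_sections_by_keywords_py (text : String) (keywords : List String) (context_lines : Int) : Prop :=
  0 ≤ context_lines
instance (text : String) (keywords : List String) (context_lines : Int) : Decidable (Pre_extract_sections_by_keywords_py text keywords context_lines) := by unfold Pre_extract_sections_by_keywords_py; infer_instance
def pvWitness_extract_sections_by_keywords_py : String × List String × Int := ("alpha\nbeta\ngamma", ["beta"], 1)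
def Spec_extract_sections_by_keywords_py (text : String) (keywords : List String) (context_lines : Int) (out : String) : Prop := out = extract_sections_by_keywords_py_alt text keywords context_lines
instance (text : String) (keywords : List String) (context_lines : Int) (out : String) : Decidable (Spec_extract_sections_by_keywords_py text keywords context_lines out) := by unfold Spec_extract_sections_by_keywords_py; infer_instance

-- ===== CLAIM (what is proved, stated in full; the proofs are below) =====
def Claim_equal_extract_sections_by_keywords_py : Prop := ∀ (text : String) (keywords : List String) (context_lines : Int), Dom_extract_sections_by_keywords_py text keywords context_lines → Pre_extract_sections_by_keywords_py text keywords context_lines → Spec_extract_sections_by_keywords_py text keywords context_lines (extract_sections_by_keywords_py text keywords context_lines)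

-- ===== LEMMAS AND PROOFS =====

-- the shared dedup step ("if line not in seen: seen.add; append") and its fold
def pvDStep (st : PySem.Set String × List String) (line : String) : PySem.Set String × List String :=
  if st.1.contains line then st else (st.1.add line, st.2 ++ [line])

def pvDed (st : PySem.Set String × List String) (l : List String) : PySem.Set String × List String :=
  l.foldl pvDStep st

lemma pvMem_ded_fst (st : PySem.Set String × List String) (l : List String) (x : String) :
    x ∈ (pvDed st l).1 ↔ x ∈ st.1 ∨ x ∈ l := by
  induction l generalizing st with
  | nil => simp [pvDed]
  | cons y t ih =>
    simp only [pvDed, List.foldl_cons] at *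
    rw [ih (pvDStep st y)]
    have hstep : ∀ z, z ∈ (pvDStep st y).1 ↔ z ∈ st.1 ∨ z = y := by
      intro z
      unfold pvDStep
      by_cases h : st.1.contains y = true
      · have hy : y ∈ st.1 := by simpa using h
        rw [if_pos h]
        constructor
        · exact Or.inl
        · rintro (hz | rfl) <;> assumption
      · rw [if_neg h]
        exact PySem.Set.mem_add st.1 y z
    rw [hstep x]
    simp only [List.mem_cons]
    tauto

lemma pvDed_skip (st : PySem.Set String × List String) (l : List String)
    (h : ∀ x ∈ l, x ∈ st.1) : pvDed st l = st := by
  induction l with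
  | nil => rfl
  | cons y t ih =>
    have hy : st.1.contains y = true := by
      simpa using h y (List.mem_cons_self)
    simp only [pvDed, List.foldl_cons]
    rw [show pvDStep st y = st from by unfold pvDStep; rw [if_pos hy]]
    exact ih fun x hx => h x (List.mem_cons_of_mem _ hx)

-- slice with clamped nonnegative bounds is the pyGetD image of the index range
lemma pvMapRange (L : List String) (a b : Int) (h0 : 0 ≤ a) (hb : b ≤ (L.length : Int)) :
    (PySem.List.pyRange a b).map (fun j => PySem.List.pyGetD L j "")
      = (L.take b.toNat).drop a.toNat := by
  by_cases hab : b ≤ a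
  · rw [PySem.List.pyRange_one_eq_nil hab]
    symm
    rw [List.map_nil, List.drop_eq_nil_iff]
    have := List.length_take_le b.toNat L
    omega
  · have hab' : a < b := lt_of_not_ge hab
    have hk : a < (L.length : Int) := lt_of_lt_of_le hab' hb
    rw [PySem.List.pyRange_one_cons hab', List.map_cons]
    have hlt : a.toNat < (L.take b.toNat).length := by
      rw [List.length_take]
      omega
    rw [List.drop_eq_getElem_cons hlt]
    congr 1
    · rw [PySem.List.pyGetD_eq_getElem _ _ h0 hk, List.getElem_take]
    · have ih := pvMapRange L (a + 1) b (by omega) hb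
      rw [ih]
      congr 1
      omega
termination_by (b - a).toNat
decreasing_by omega

lemma pvSlice_eq_map (L : List String) (a b : Int) (h0 : 0 ≤ a) (hb0 : 0 ≤ b)
    (hb : b ≤ (L.length : Int)) :
    PySem.List.slice L (some a) (some b)
      = (PySem.List.pyRange a b).map (fun j => PySem.List.pyGetD L j "") := by
  have hs : PySem.List.slice L (some a) (some b)
      = List.take (b.toNat - a.toNat) (List.drop a.toNat L) := by
    have h := PySem.List.slice_natCast L a.toNat b.toNat
    rwa [Int.toNat_of_nonneg h0, Int.toNat_of_nonneg hb0] at h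
  rw [hs, pvMapRange L a b h0 hb, List.drop_take]

-- enumerate: indices are s, s+1, …
lemma pvEnum_cons {α : Type} (x : α) (t : List α) (s : Int) :
    PySem.List.enumerate (x :: t) s = (s, x) :: PySem.List.enumerate t (s + 1) := rfl

lemma pvEnum_mem_bounds {α : Type} (L : List α) (s : Int) :
    ∀ p ∈ PySem.List.enumerate L s, s ≤ p.1 ∧ p.1 < s + L.length := by
  induction L generalizing s with
  | nil => intro p hp; simp [PySem.List.enumerate] at hp
  | cons x t ih =>
    intro p hp
    rw [pvEnum_cons, List.mem_cons] at hp
    rcases hp with rfl | hp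
    · simp
    · have := ih (s + 1) p hp
      simp only [List.length_cons]
      push_cast at *
      omega

lemma pvEnum_pairwise {α : Type} (L : List α) (s : Int) :
    (PySem.List.enumerate L s).Pairwise (fun p q => p.1 < q.1) := by
  induction L generalizing s with
  | nil => exact List.Pairwise.nil
  | cons x t ih =>
    rw [pvEnum_cons]
    refine List.Pairwise.cons ?_ (ih (s + 1))
    intro q hq
    have := pvEnum_mem_bounds t (s + 1) q hq
    simp only
    omega

-- the merged one-pass sweep computes the same dedup state as folding the full windows
lemma pvMain_loop (L : List String) (c : Int) (hc : 0 ≤ c) :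
    ∀ (ms : List Int) (st : PySem.Set String × List String) (hi : Int),
      ms.Pairwise (· ≤ ·) → (∀ i ∈ ms, 0 ≤ i ∧ i < (L.length : Int)) →
      0 ≤ hi → hi ≤ (L.length : Int) →
      (∀ j i, i ∈ ms → max 0 (i - c) ≤ j → j < hi → PySem.List.pyGetD L j "" ∈ st.1) →
      ms.foldl (fun st i =>
          pvDed st ((PySem.List.pyRange (max 0 (i - c)) (min (L.length : Int) (i + c + 1))).map
            (fun j => PySem.List.pyGetD L j ""))) st
        = (ms.foldl (fun (p : (PySem.Set String × List String) × Int) i =>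
            (pvDed p.1 ((PySem.List.pyRange (max (max 0 (i - c)) p.2) (min (L.length : Int) (i + c + 1))).map
              (fun j => PySem.List.pyGetD L j "")), max p.2 (min (L.length : Int) (i + c + 1))))
            (st, hi)).1 := by
  intro ms
  induction ms with
  | nil => intro st hi _ _ _ _ _; rfl
  | cons i t ih =>
    intro st hi hpair hmem hhi0 hhin hinv
    have hi0 : 0 ≤ i := (hmem i List.mem_cons_self).1
    have hin : i < (L.length : Int) := (hmem i List.mem_cons_self).2
    set s : Int := max 0 (i - c) with hs_def
    set e : Int := min (L.length : Int) (i + c + 1) with he_def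
    have hs0 : 0 ≤ s := le_max_left _ _
    have hsi : s ≤ i := by omega
    have hie : i < e := by omega
    have hen : e ≤ (L.length : Int) := min_le_left _ _
    -- split the full window at p into the already-covered part and the fresh part
    set p : Int := max s (min e (max s hi)) with hp_def
    have hsp : s ≤ p := le_max_left _ _
    have hpe : p ≤ e := by omega
    have hsplit : PySem.List.pyRange s e = PySem.List.pyRange s p ++ PySem.List.pyRange p e :=
      PySem.List.pyRange_one_append s p e hsp hpe
    have hfresh : PySem.List.pyRange p e = PySem.List.pyRange (max s hi) e := by
      by_cases h : max s hi ≤ e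
      · have : p = max s hi := by omega
        rw [this]
      · have h1 : e ≤ p := by omega
        have h2 : e ≤ max s hi := by omega
        rw [PySem.List.pyRange_one_eq_nil h1, PySem.List.pyRange_one_eq_nil h2]
    have hskip : pvDed st ((PySem.List.pyRange s p).map (fun j => PySem.List.pyGetD L j "")) = st := by
      apply pvDed_skip
      intro x hx
      rcases List.mem_map.mp hx with ⟨j, hj, rfl⟩
      rcases PySem.List.mem_pyRange_one.mp hj with ⟨hj1, hj2⟩
      have hjhi : j < hi := by omega
      exact hinv j i List.mem_cons_self (by omega) hjhi
    have hhead : pvDed st ((PySem.List.pyRange s e).map (fun j => PySem.List.pyGetD L j ""))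
        = pvDed st ((PySem.List.pyRange (max s hi) e).map (fun j => PySem.List.pyGetD L j "")) := by
      rw [hsplit, List.map_append]
      unfold pvDed
      rw [List.foldl_append]
      rw [show List.foldl pvDStep st ((PySem.List.pyRange s p).map (fun j => PySem.List.pyGetD L j "")) = st from hskip]
      rw [hfresh]
    set st' : PySem.Set String × List String :=
      pvDed st ((PySem.List.pyRange (max s hi) e).map (fun j => PySem.List.pyGetD L j "")) with hst'_def
    have hstep : ∀ m ∈ t, i ≤ m := (List.pairwise_cons.mp hpair).1
    simp only [List.foldl_cons]
    rw [hhead]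
    exact ih st' (max hi e) (List.Pairwise.of_cons hpair)
      (fun m hm => hmem m (List.mem_cons_of_mem _ hm)) (by omega) (by omega)
      (by
        intro j m hm hjs hjhi
        by_cases hj : j < hi
        · exact (pvMem_ded_fst st _ _).mpr
            (Or.inl (hinv j m (List.mem_cons_of_mem _ hm) hjs hj))
        · have him : i ≤ m := hstep m hm
          have hj1 : max s hi ≤ j := by omega
          have hj2 : j < e := by omega
          apply (pvMem_ded_fst st _ _).mpr
          apply Or.inr
          exact List.mem_map.mpr ⟨j, PySem.List.mem_pyRange_one.mpr ⟨hj1, hj2⟩, rfl⟩)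

lemma pvFoldl_if_append {α β : Type} (pred : α → Bool) (g : α → List β) (l : List α) (acc : List β) :
    l.foldl (fun a p => if pred p then a ++ g p else a) acc = acc ++ (l.filter pred).flatMap g := by
  induction l generalizing acc with
  | nil => simp
  | cons x t ih =>
    rw [List.foldl_cons, List.filter_cons]
    by_cases h : pred x
    · rw [if_pos h, if_pos h, ih, List.flatMap_cons, List.append_assoc]
    · rw [if_neg h, if_neg h, ih]

-- both ports, after splitting the text, compute the same dedup state
lemma pvCore (L kw : List String) (c : Int) (hc : 0 ≤ c) :
    List.foldl (fun st line => if st.1.contains line = true then st else (st.1.add line, st.2 ++ [line]))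
        (PySem.Set.empty, ([] : List String))
        (List.foldl (fun acc p =>
            if (kw.any fun keyword => PySem.Str.isIn keyword (PySem.Str.lower p.2)) = true then
              acc ++ PySem.List.slice L (some (max 0 (p.1 - c))) (some (min ((L.length : Int)) (p.1 + c + 1)))
            else acc) [] (PySem.List.enumerate L))
      = (List.foldl (fun st i =>
            (List.foldl (fun d j =>
                if d.1.contains (PySem.List.pyGetD L j "") = true then d
                else (d.1.add (PySem.List.pyGetD L j ""), d.2 ++ [PySem.List.pyGetD L j ""]))
              st.1 (PySem.List.pyRange (max (max 0 (i - c)) st.2) (min ((L.length : Int)) (i + c + 1))),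
              max st.2 (min ((L.length : Int)) (i + c + 1))))
          ((PySem.Set.empty, []), 0)
          (List.map (fun p => p.1) (List.filter (fun p => kw.any fun k => PySem.Str.isIn k (PySem.Str.lower p.2)) (PySem.List.enumerate L)))).1 := by
  rw [pvFoldl_if_append]
  rw [List.nil_append]
  rw [List.foldl_flatMap]
  refine Eq.trans (PySem.List.foldl_congr_mem _ _
      (fun st p => List.foldl (fun st line => if st.1.contains line = true then st else (st.1.add line, st.2 ++ [line])) st
        ((PySem.List.pyRange (max 0 (p.1 - c)) (min ((L.length : Int)) (p.1 + c + 1))).map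
          (fun j => PySem.List.pyGetD L j ""))) _ ?_) ?_
  · intro acc p hp
    have hb := pvEnum_mem_bounds L 0 p (List.mem_of_mem_filter hp)
    rw [pvSlice_eq_map L _ _ (by omega) (by omega) (by omega)]
  · have H := pvMain_loop L c hc
      (List.map (fun p => p.1) (List.filter (fun p => kw.any fun k => PySem.Str.isIn k (PySem.Str.lower p.2)) (PySem.List.enumerate L)))
      (PySem.Set.empty, []) 0
      (by
        rw [List.pairwise_map]
        exact ((pvEnum_pairwise L 0).filter _).imp (fun h => le_of_lt h))
      (by
        intro i hi
        rcases List.mem_map.mp hi with ⟨p, hp, rfl⟩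
        have := pvEnum_mem_bounds L 0 p (List.mem_of_mem_filter hp)
        omega)
      le_rfl
      (by exact_mod_cast Int.natCast_nonneg L.length)
      (by intro j i _ hmax hj; exfalso; omega)
    simp only [pvDed] at H
    unfold pvDStep at H
    simp only [List.foldl_map] at H ⊢
    exact H

lemma pvPorts_eq (text : String) (kw : List String) (c : Int) (hc : 0 ≤ c) :
    extract_sections_by_keywords_py text kw c = extract_sections_by_keywords_py_alt text kw c := by
  unfold extract_sections_by_keywords_py extract_sections_by_keywords_py_alt
  simp only [PySem.List.len_eq]
  generalize (PySem.Str.split? text "\n").getD [] = L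
  rw [pvCore L kw c hc]

-- ===== VERDICT (by name: the statement is the Claim_ definition above) =====
theorem extract_sections_by_keywords_py_spec : Claim_equal_extract_sections_by_keywords_py := by
  intro text keywords context_lines _hdom hpre
  unfold Spec_extract_sections_by_keywords_py
  exact pvPorts_eq text keywords context_lines hpre
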